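-- pv_equiv track=rewrite | github.com/Morfildor/regcheck-api | scripts/catalog_audit.py | _route_anchor_distribution_by_family
-- ===== SOURCE A (Python) =====
-- from collections import Counter, defaultdict
-- from collections.abc import Iterable, Iterator, Mapping
-- from typing import Any
--
-- def _route_anchor_distribution_by_family(products: list[Mapping[str, Any]]) -> list[str]:
--     by_family: dict[str, Counter[str]] = defaultdict(Counter)
--     for product in products:
--         family = str(product.get("product_family") or "unknown")
--         anchor = str(product.get("route_anchor") or "missing")
--         by_family[family][anchor] += 1
--
--     rows: list[str] = []
--     for family in sorted(by_family):
--         parts = [f"{anchor}={count}" for anchor, count in by_family[family].most_common()]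
--         rows.append(f"{family}: {', '.join(parts)}")
--     return rows
-- ===== SOURCE B (Python) =====
-- def _family_row(products, family):
--     anchors = [str(p.get("route_anchor") or "missing") for p in products
--                if str(p.get("product_family") or "unknown") == family]
--     items = sorted([(a, anchors.count(a)) for a in dict.fromkeys(anchors)],
--                    key=lambda t: t[1], reverse=True)
--     return family + ": " + ", ".join(f"{a}={c}" for a, c in items)
--
--
-- def _route_anchor_distribution_by_family(products):
--     families = sorted({str(p.get("product_family") or "unknown") for p in products})
--     return [_family_row(products, f) for f in families]
-- ===== Notes on version B (the rewrite author's own statement) =====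
-- stated objective: alternative
-- what changed: Replaces A's single-pass defaultdict(Counter) accumulation with a per-family recount: take the sorted set of family keys, and for each family filter the products, dedup the anchors in first-seen order and count each anchor directly, sorting the (anchor,count) pairs by count descending to reproduce most_common's stable order.
import Mathlib
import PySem

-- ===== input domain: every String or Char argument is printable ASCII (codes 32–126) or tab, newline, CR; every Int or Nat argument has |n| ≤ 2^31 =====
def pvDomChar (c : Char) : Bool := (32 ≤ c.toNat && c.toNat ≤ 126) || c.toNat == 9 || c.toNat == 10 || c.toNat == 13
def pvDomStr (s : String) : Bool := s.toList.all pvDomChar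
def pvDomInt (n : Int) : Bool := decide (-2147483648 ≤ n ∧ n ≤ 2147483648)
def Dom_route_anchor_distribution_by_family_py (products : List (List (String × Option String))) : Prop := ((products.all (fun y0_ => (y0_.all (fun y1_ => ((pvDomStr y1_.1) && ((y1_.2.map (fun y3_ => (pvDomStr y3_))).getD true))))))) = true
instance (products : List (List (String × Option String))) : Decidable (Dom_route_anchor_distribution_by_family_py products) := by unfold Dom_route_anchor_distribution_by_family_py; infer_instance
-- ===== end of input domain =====

-- B replaces A's one-pass defaultdict(Counter) accumulation by a per-family recount:
-- sorted set of family keys, then for each family a filter + dedup + count pass (alternative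
-- decomposition, not faster). Both Pythons mutate nothing.

-- shared helpers: `str(product.get(k) or dflt)` (both Pythons use this exact expression)
def pvGetKey (p : List (String × Option String)) (k : String) : Option (Option String) :=
  (p.find? (fun q => q.1 == k)).map (·.2)

def pvOrStr (v : Option (Option String)) (dflt : String) : String :=
  match v with
  | some (some s) => if s = "" then dflt else s
  | _ => dflt

def pvFam (p : List (String × Option String)) : String := pvOrStr (pvGetKey p "product_family") "unknown"
def pvAnch (p : List (String × Option String)) : String := pvOrStr (pvGetKey p "route_anchor") "missing"

-- ===== PORT A =====
def route_anchor_distribution_by_family_py (products : List (List (String × Option String))) : List String :=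
  -- by_family: dict[str, Counter[str]] built in one pass (defaultdict(Counter); += via modify)
  let by_family : PySem.Dict String (PySem.Dict String Int) :=
    products.foldl (fun d product =>
      let family := pvFam product
      let anchor := pvAnch product
      d.modify family PySem.Dict.empty (fun c => c.modify anchor 0 (· + 1))) PySem.Dict.empty
  -- rows: for family in sorted(by_family): parts from most_common()
  (PySem.List.sorted by_family.keys (fun f => f) false).foldl (fun rows family =>
    let parts := (PySem.List.sorted (by_family.getD family PySem.Dict.empty).items (fun t => t.2) true).map
      (fun t => t.1 ++ "=" ++ PySem.Int.toStr t.2)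
    rows ++ [family ++ ": " ++ PySem.Str.join ", " parts]) []

-- ===== PORT B =====
def family_row (products : List (List (String × Option String))) (family : String) : String :=
  let anchors := (products.filter (fun p => pvFam p == family)).map pvAnch
  let items := PySem.List.sorted
    ((PySem.List.dedup anchors).map (fun a => (a, (PySem.List.count anchors a : Int)))) (fun t => t.2) true
  family ++ ": " ++ PySem.Str.join ", " (items.map (fun t => t.1 ++ "=" ++ PySem.Int.toStr t.2))

def route_anchor_distribution_by_family_py_alt (products : List (List (String × Option String))) : List String :=
  let families := PySem.List.sorted (PySem.Set.ofList (products.map pvFam)) (fun f => f) false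
  families.map (family_row products)

-- ===== PRECONDITION & SPEC =====
def Spec_route_anchor_distribution_by_family_py (products : List (List (String × Option String))) (out : List String) : Prop := out = route_anchor_distribution_by_family_py_alt products
instance (products : List (List (String × Option String))) (out : List String) : Decidable (Spec_route_anchor_distribution_by_family_py products out) := by unfold Spec_route_anchor_distribution_by_family_py; infer_instance

-- ===== CLAIM (what is proved, stated in full; the proofs are below) =====
def Claim_equal_route_anchor_distribution_by_family_py : Prop := ∀ (products : List (List (String × Option String))), Dom_route_anchor_distribution_by_family_py products → Spec_route_anchor_distribution_by_family_py products (route_anchor_distribution_by_family_py products)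

-- ===== LEMMAS AND PROOFS =====

-- the inner slot of A's nested fold at key `f` is the fold over the matching pairs only
lemma nested_getD (l : List (String × String)) (d : PySem.Dict String (PySem.Dict String Int)) (f : String) :
    (l.foldl (fun d p => d.modify p.1 PySem.Dict.empty (fun c => c.modify p.2 0 (· + 1))) d).getD f PySem.Dict.empty
      = ((l.filter (fun p => p.1 == f)).map (·.2)).foldl
          (fun c a => c.modify a 0 (· + 1)) (d.getD f PySem.Dict.empty) := by
  induction l generalizing d with
  | nil => rfl
  | cons p l ih =>
    simp only [List.foldl_cons, List.filter_cons]
    by_cases h : p.1 = f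
    · simp only [h, beq_self_eq_true, if_pos, List.map_cons, List.foldl_cons, ih,
        PySem.Dict.getD_modify_self]
    · have hb : (p.1 == f) = false := beq_eq_false_iff_ne.mpr h
      simp only [hb, if_neg, Bool.false_eq_true, not_false_iff, ih,
        PySem.Dict.getD_modify_of_ne _ _ _ (Ne.symm h)]

-- a modify-counting fold from empty IS Counter(xs)
lemma foldl_modify_eq_counter (xs : List String) :
    xs.foldl (fun c a => c.modify a 0 (· + 1)) PySem.Dict.empty = PySem.Dict.counter xs := by
  rw [← PySem.Dict.foldl_insert_getD_add_one_eq_counter]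
  have hstep : (fun (c : PySem.Dict String Int) (a : String) => c.modify a 0 (· + 1))
      = fun c a => c.insert a (c.getD a 0 + 1) := by
    funext c a
    exact PySem.Dict.ext_iff.mpr rfl
  rw [hstep]

theorem route_anchor_distribution_by_family_py_spec_aux (products : List (List (String × Option String))) :
    route_anchor_distribution_by_family_py products = route_anchor_distribution_by_family_py_alt products := by
  unfold route_anchor_distribution_by_family_py route_anchor_distribution_by_family_py_alt
  dsimp only
  -- view A's one-pass fold as a fold over the (family, anchor) pairs
  have hfold :
      products.foldl (fun d product =>
          d.modify (pvFam product) PySem.Dict.empty (fun c => c.modify (pvAnch product) 0 (· + 1)))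
        PySem.Dict.empty
        = (products.map (fun p => (pvFam p, pvAnch p))).foldl
            (fun d p => d.modify p.1 PySem.Dict.empty (fun c => c.modify p.2 0 (· + 1)))
            (PySem.Dict.empty : PySem.Dict String (PySem.Dict String Int)) := by
    rw [List.foldl_map]
  rw [hfold]
  -- the outer keys are the deduped family list
  have hkeys :
      ((products.map (fun p => (pvFam p, pvAnch p))).foldl
          (fun d p => d.modify p.1 PySem.Dict.empty (fun c => c.modify p.2 0 (· + 1)))
          (PySem.Dict.empty : PySem.Dict String (PySem.Dict String Int))).keys = PySem.Set.ofList (products.map pvFam) := by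
    have := PySem.Dict.keys_foldl_modify_key (products.map (fun p => (pvFam p, pvAnch p)))
      (fun p => p.1) (PySem.Dict.empty : PySem.Dict String Int)
      (fun _ p => fun c => c.modify p.2 0 (· + 1)) PySem.Dict.empty
    simpa [PySem.Dict.keys_empty, PySem.Set.update_nil_left, List.map_map, Function.comp] using this
  rw [hkeys, PySem.List.foldl_append_singleton_eq_map, List.nil_append]
  -- per-family rows agree for EVERY family key
  apply List.map_congr_left
  intro family _
  unfold family_row
  -- A's counter slot for `family` is Counter over B's filtered anchor list
  have hanchors :
      ((products.map (fun p => (pvFam p, pvAnch p))).filter (fun p => p.1 == family)).map (·.2)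
        = (products.filter (fun p => pvFam p == family)).map pvAnch := by
    rw [List.filter_map, List.map_map]
    rfl
  have hslot := nested_getD (products.map (fun p => (pvFam p, pvAnch p))) PySem.Dict.empty family
  rw [hanchors] at hslot
  have hempty : (PySem.Dict.empty : PySem.Dict String (PySem.Dict String Int)).getD family PySem.Dict.empty
      = PySem.Dict.empty := rfl
  rw [hempty, foldl_modify_eq_counter] at hslot
  simp only [hslot, PySem.Dict.items_counter, PySem.List.dedup_eq_ofList]
  rfl

-- ===== VERDICT (by name: the statement is the Claim_ definition above) =====
theorem route_anchor_distribution_by_family_py_spec : Claim_equal_route_anchor_distribution_by_family_py := by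
  intro products _
  exact route_anchor_distribution_by_family_py_spec_aux products
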